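-- pv_equiv track=rewrite | github.com/bitplane/winhlp | src/winhlp/lib/internal_files/context.py | _try_construct_suffix
-- ===== SOURCE A (Python) =====
-- from typing import Optional, Dict
--
-- def _try_construct_suffix(remaining_hash: int, length: int) -> Optional[str]:
--     """Try to construct a valid suffix of given length that produces remaining_hash."""
--     untable = [
--         0,
--         "1",
--         "2",
--         "3",
--         "4",
--         "5",
--         "6",
--         "7",
--         "8",
--         "9",
--         "0",
--         0,
--         ".",
--         "_",
--         0,
--         0,
--         0,
--         "A",
--         "B",
--         "C",
--         "D",
--         "E",
--         "F",
--         "G",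
--         "H",
--         "I",
--         "J",
--         "K",
--         "L",
--         "M",
--         "N",
--         "O",
--         "P",
--         "Q",
--         "R",
--         "S",
--         "T",
--         "U",
--         "V",
--         "W",
--         "X",
--         "Y",
--         "Z",
--     ]
--
--     suffix = []
--     h = remaining_hash
--
--     for _ in range(length):
--         if h == 0:
--             break
--         remainder = h % 43
--         if remainder < len(untable) and untable[remainder] and untable[remainder] != 0:
--             suffix.insert(0, untable[remainder])
--             h //= 43
--         else:
--             return None
--
--     return "".join(suffix) if h == 0 else None
-- ===== SOURCE B (Python) =====
-- from typing import Optional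
--
--
-- def _digit_char(r: int) -> Optional[str]:
--     """Arithmetic decoding of one base-43 digit (no lookup table)."""
--     if 1 <= r <= 9:
--         return chr(ord('0') + r)
--     if r == 10:
--         return '0'
--     if r == 12:
--         return '.'
--     if r == 13:
--         return '_'
--     if 17 <= r <= 42:
--         return chr(ord('A') + r - 17)
--     return None
--
--
-- def _try_construct_suffix(remaining_hash: int, length: int) -> Optional[str]:
--     """Try to construct a valid suffix of given length that produces remaining_hash."""
--     if remaining_hash == 0:
--         return ""
--     if remaining_hash < 0:
--         # a negative hash is never exhausted by floor division, so no suffix exists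
--         return None
--     if length <= 0:
--         return None
--     c = _digit_char(remaining_hash % 43)
--     if c is None:
--         return None
--     rest = _try_construct_suffix(remaining_hash // 43, length - 1)
--     return None if rest is None else rest + c
-- ===== Notes on version B (the rewrite author's own statement) =====
-- stated objective: alternative
-- what changed: A's iterative loop that looks each remainder up in a 43-entry table and prepends into a list is replaced by structural recursion on length with the character computed arithmetically from the remainder (chr offsets instead of any table), appending the recursive result; a negative hash is rejected up front since floor division never exhausts it.
import Mathlib
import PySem

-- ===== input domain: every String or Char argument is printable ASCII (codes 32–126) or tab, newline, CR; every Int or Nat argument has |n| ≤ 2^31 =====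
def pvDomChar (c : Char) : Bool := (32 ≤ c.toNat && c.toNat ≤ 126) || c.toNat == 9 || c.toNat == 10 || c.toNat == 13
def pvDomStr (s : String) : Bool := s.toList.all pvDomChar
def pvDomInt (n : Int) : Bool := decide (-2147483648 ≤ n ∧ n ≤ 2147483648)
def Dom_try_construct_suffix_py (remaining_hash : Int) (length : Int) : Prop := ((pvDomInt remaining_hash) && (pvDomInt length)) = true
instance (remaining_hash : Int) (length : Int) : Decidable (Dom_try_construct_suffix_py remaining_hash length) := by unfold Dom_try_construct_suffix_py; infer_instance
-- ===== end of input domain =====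

set_option maxRecDepth 8000


-- B replaces A's iterative table-lookup-and-prepend loop by structural recursion on length
-- with the character computed arithmetically from the remainder; objective: alternative.

-- ===== PORT A =====
-- A's untable: Python mixes the falsy int 0 with one-char strings; ported as Option Char
-- (none = the int 0), so 'untable[r] and untable[r] != 0' is exactly 'entry = some c'.
def pvUntableA : List (Option Char) :=
  [none, some '1', some '2', some '3', some '4', some '5', some '6', some '7', some '8',
   some '9', some '0', none, some '.', some '_', none, none, none, some 'A', some 'B',
   some 'C', some 'D', some 'E', some 'F', some 'G', some 'H', some 'I', some 'J',
   some 'K', some 'L', some 'M', some 'N', some 'O', some 'P', some 'Q', some 'R',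
   some 'S', some 'T', some 'U', some 'V', some 'W', some 'X', some 'Y', some 'Z']

-- the 'for _ in range(length)' loop of A: n = remaining iterations, suffix kept as the
-- list A prepends into; 'none' = the early 'return None'.
def pvALoop : Nat → Int → List Char → Option (List Char × Int)
  | 0, h, suffix => some (suffix, h)
  | n + 1, h, suffix =>
    if h = 0 then some (suffix, h)
    else
      let remainder := PySem.Int.mod h 43
      if remainder < (43 : Int) then
        match PySem.List.pyGet? pvUntableA remainder with
        | some (some c) => pvALoop n (PySem.Int.floordiv h 43) (c :: suffix)
        | _ => none
      else none

def try_construct_suffix_py (remaining_hash : Int) (length : Int) : Option String :=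
  match pvALoop length.toNat remaining_hash [] with
  | none => none
  | some (suffix, h) => if h = 0 then some (String.ofList suffix) else none

-- ===== PORT B =====
-- Source B's _digit_char: the character from the remainder by chr-offset arithmetic.
def pvDigitChar (r : Int) : Option Char :=
  if 1 ≤ r ∧ r ≤ 9 then some (Char.ofNat ('0'.toNat + r.toNat))
  else if r = 10 then some '0'
  else if r = 12 then some '.'
  else if r = 13 then some '_'
  else if 17 ≤ r ∧ r ≤ 42 then some (Char.ofNat ('A'.toNat + (r - 17).toNat))
  else none

-- Source B's recursion: base cases hash = 0 / negative hash / exhausted length, then one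
-- digit decoded and appended to the recursive result on (hash // 43, length - 1).
def try_construct_suffix_py_alt (remaining_hash : Int) (length : Int) : Option String :=
  if remaining_hash = 0 then some ""
  else if remaining_hash < 0 then none
  else if length ≤ 0 then none
  else
    match pvDigitChar (PySem.Int.mod remaining_hash 43) with
    | none => none
    | some c =>
      match try_construct_suffix_py_alt (PySem.Int.floordiv remaining_hash 43) (length - 1) with
      | none => none
      | some rest => some (rest ++ String.ofList [c])
termination_by length.toNat
decreasing_by omega

-- ===== PRECONDITION & SPEC =====
def Spec_try_construct_suffix_py (remaining_hash : Int) (length : Int) (out : Option String) : Prop := out = try_construct_suffix_py_alt remaining_hash length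
instance (remaining_hash : Int) (length : Int) (out : Option String) : Decidable (Spec_try_construct_suffix_py remaining_hash length out) := by unfold Spec_try_construct_suffix_py; infer_instance

-- ===== CLAIM (what is proved, stated in full; the proofs are below) =====
def Claim_equal_try_construct_suffix_py : Prop := ∀ (remaining_hash : Int) (length : Int), Dom_try_construct_suffix_py remaining_hash length → Spec_try_construct_suffix_py remaining_hash length (try_construct_suffix_py remaining_hash length)

-- ===== LEMMAS AND PROOFS =====

-- A's table lookup agrees with B's arithmetic decoder on every remainder 0 ≤ r < 43
theorem pv_lookup_agree (r : Int) (h0 : 0 ≤ r) (h1 : r < 43) :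
    PySem.List.pyGet? pvUntableA r = some (pvDigitChar r) := by
  interval_cases r <;> decide

-- A's finishing step as a function of the loop result
def pvFinishA : Option (List Char × Int) → Option String
  | none => none
  | some (suffix, h) => if h = 0 then some (String.ofList suffix) else none

theorem pv_fdiv_neg (h : Int) (hneg : h < 0) : PySem.Int.floordiv h 43 < 0 := by
  have hid := PySem.Int.floordiv_mul_add_mod h 43
  have hb1 := PySem.Int.mod_nonneg h (b := 43) (by norm_num)
  have hb2 := PySem.Int.mod_lt h (b := 43) (by norm_num)
  nlinarith [hid, hb1, hb2]

-- a negative hash never reaches 0, so A's loop+finish yields none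
theorem pv_neg_none (n : Nat) : ∀ (h : Int) (suffix : List Char), h < 0 →
    pvFinishA (pvALoop n h suffix) = none := by
  induction n with
  | zero => intro h suffix hneg; simp [pvALoop, pvFinishA]; omega
  | succ n ih =>
    intro h suffix hneg
    have hz : h ≠ 0 := by omega
    have hb1 := PySem.Int.mod_nonneg h (b := 43) (by norm_num : (0:Int) < 43)
    have hb2 := PySem.Int.mod_lt h (b := 43) (by norm_num : (0:Int) < 43)
    simp only [pvALoop, if_neg hz, if_pos hb2]
    rw [pv_lookup_agree _ hb1 hb2]
    cases pvDigitChar (PySem.Int.mod h 43) with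
    | none => rfl
    | some c => exact ih _ (c :: suffix) (pv_fdiv_neg h hneg)

-- main invariant: A's loop+finish equals B's recursion (at fuel-many steps), modulo the
-- partially built suffix appended on the right
theorem pv_key (n : Nat) : ∀ (h : Int) (suffix : List Char),
    pvFinishA (pvALoop n h suffix) =
      (try_construct_suffix_py_alt h (n : Int)).map (fun s => s ++ String.ofList suffix) := by
  induction n with
  | zero =>
    intro h suffix
    rcases lt_trichotomy h 0 with hneg | hz | hpos
    · rw [pv_neg_none 0 h suffix hneg]
      rw [try_construct_suffix_py_alt]
      simp [if_neg (by omega : ¬ h = 0), hneg]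
    · subst hz
      rw [try_construct_suffix_py_alt]
      simp [pvALoop, pvFinishA]
    · rw [try_construct_suffix_py_alt]
      simp [pvALoop, pvFinishA, if_neg (by omega : ¬ h = 0)]
  | succ n ih =>
    intro h suffix
    rcases lt_trichotomy h 0 with hneg | hz | hpos
    · rw [pv_neg_none (n + 1) h suffix hneg]
      rw [try_construct_suffix_py_alt]
      simp [if_neg (by omega : ¬ h = 0), hneg]
    · subst hz
      rw [try_construct_suffix_py_alt]
      simp [pvALoop, pvFinishA]
    · have hz : h ≠ 0 := by omega
      have hb1 := PySem.Int.mod_nonneg h (b := 43) (by norm_num : (0:Int) < 43)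
      have hb2 := PySem.Int.mod_lt h (b := 43) (by norm_num : (0:Int) < 43)
      rw [try_construct_suffix_py_alt]
      rw [show ((n + 1 : Nat) : Int) = (n : Int) + 1 by push_cast; ring]
      simp only [pvALoop, if_neg hz, if_pos hb2, pv_lookup_agree _ hb1 hb2,
        if_neg (by omega : ¬ ((n : Int) + 1 ≤ 0)), if_neg (by omega : ¬ h < 0)]
      rw [show ((n : Int) + 1) - 1 = (n : Int) by ring]
      cases pvDigitChar (PySem.Int.mod h 43) with
      | none => rfl
      | some c =>
        rw [ih (PySem.Int.floordiv h 43) (c :: suffix)]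
        cases try_construct_suffix_py_alt (PySem.Int.floordiv h 43) (n : Int) with
        | none => rfl
        | some rest =>
          simp only [Option.map_some]
          rw [show (c :: suffix) = [c] ++ suffix from rfl, String.ofList_append,
            ← String.append_assoc]

-- B does not look at length beyond its sign once the hash is fixed: for negative length
-- length.toNat = 0 and both sides take the length ≤ 0 / hash = 0 branch
theorem pv_alt_toNat (h len : Int) :
    try_construct_suffix_py_alt h len = try_construct_suffix_py_alt h (len.toNat : Int) := by
  rcases le_or_gt 0 len with hle | hlt
  · rw [Int.toNat_of_nonneg hle]
  · rw [show ((len.toNat : Int)) = 0 by omega]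
    have h1 : len ≤ 0 := by omega
    conv_lhs => rw [try_construct_suffix_py_alt]
    conv_rhs => rw [try_construct_suffix_py_alt]
    by_cases hh : h = 0 <;> by_cases hh2 : h < 0 <;> simp [hh, hh2, h1]

-- ===== VERDICT (by name: the statement is the Claim_ definition above) =====
theorem try_construct_suffix_py_spec : Claim_equal_try_construct_suffix_py := by
  intro remaining_hash length _
  show try_construct_suffix_py remaining_hash length = try_construct_suffix_py_alt remaining_hash length
  have hkey := pv_key length.toNat remaining_hash []
  unfold try_construct_suffix_py
  rw [show (match pvALoop length.toNat remaining_hash [] with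
        | none => (none : Option String)
        | some (suffix, h) => if h = 0 then some (String.ofList suffix) else none) =
      pvFinishA (pvALoop length.toNat remaining_hash []) from by
        cases pvALoop length.toNat remaining_hash [] with
        | none => rfl
        | some p => cases p; rfl]
  rw [hkey, ← pv_alt_toNat]
  have hmap : ∀ o : Option String, o.map (fun s => s ++ String.ofList []) = o := by
    intro o; cases o with
    | none => rfl
    | some s => simp [String.ofList_nil]
  exact hmap _
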